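-- pv_equiv track=rewrite | github.com/WinDustick/WinStore | scripts/data_generation/products/generate_gpu_nvidia.py | pick_available_vendors
-- ===== SOURCE A (Python) =====
-- from typing import List, Dict, Any, Optional, Tuple
--
-- VENDORS_PER_MODEL = 6
--
-- NVIDIA_PARTNERS_PREFERRED = [
--     # Popular AIBs (names should match Vendors table as-is where possible)
--     'MSI', 'Asus', 'Gigabyte Technology', 'Gigabyte', 'EVGA', 'Zotac', 'PNY', 'Palit', 'Gainward', 'KFA2', 'Colorful', 'Inno3D', 'GALAX', 'Super Flower'
-- ]
--
-- def pick_available_vendors(vendors_map: Dict[str, int]) -> List[Tuple[str, int]]: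
--     # Case-insensitive pick from preferred list
--     vm_lower = {k.lower(): (k, vid) for k, vid in vendors_map.items()}
--     chosen: List[Tuple[str, int]] = []
--     for name in NVIDIA_PARTNERS_PREFERRED:
--         hit = vm_lower.get(name.lower())
--         if hit:
--             chosen.append(hit)
--     # Fallback: include NVIDIA itself for FE variants if present
--     if 'nvidia' in vm_lower:
--         chosen.append(vm_lower['nvidia'])
--     # Deduplicate and limit
--     unique = []
--     seen = set()
--     for name, vid in chosen:
--         if vid not in seen:
--             unique.append((name, vid))
--             seen.add(vid)
--     return unique[:VENDORS_PER_MODEL]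
-- ===== SOURCE B (Python) =====
-- from typing import List, Dict, Tuple
--
-- VENDORS_PER_MODEL = 6
--
-- NVIDIA_PARTNERS_PREFERRED = [
--     'MSI', 'Asus', 'Gigabyte Technology', 'Gigabyte', 'EVGA', 'Zotac', 'PNY', 'Palit', 'Gainward', 'KFA2', 'Colorful', 'Inno3D', 'GALAX', 'Super Flower'
-- ]
--
-- def pick_available_vendors(vendors_map: Dict[str, int]) -> List[Tuple[str, int]]:
--     # Same case-insensitive last-wins map as the original
--     vm_lower = {k.lower(): (k, vid) for k, vid in vendors_map.items()}
--     # Priority index: preferred names by position, NVIDIA itself last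
--     rank = {name.lower(): i for i, name in enumerate(NVIDIA_PARTNERS_PREFERRED)}
--     rank['nvidia'] = len(NVIDIA_PARTNERS_PREFERRED)
--     # Counting-sort style: one pass over the vendor map drops each hit into its rank slot
--     buckets = [None] * (len(NVIDIA_PARTNERS_PREFERRED) + 1)
--     for k, hit in vm_lower.items():
--         r = rank.get(k)
--         if r is not None:
--             buckets[r] = hit
--     # Walk slots in priority order, dedup by vendor id, limit
--     unique: List[Tuple[str, int]] = []
--     seen = set()
--     for hit in buckets:
--         if hit is not None and hit[1] not in seen:
--             unique.append(hit)
--             seen.add(hit[1])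
--     return unique[:VENDORS_PER_MODEL]
-- ===== Notes on version B (the rewrite author's own statement) =====
-- stated objective: alternative
-- what changed: Instead of scanning the preferred-vendor list and looking each name up in the map, B makes one pass over the vendor map dropping each entry into a precomputed rank bucket (counting-sort by priority, NVIDIA ranked last), then walks the buckets in order deduplicating by vendor id.
import Mathlib
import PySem

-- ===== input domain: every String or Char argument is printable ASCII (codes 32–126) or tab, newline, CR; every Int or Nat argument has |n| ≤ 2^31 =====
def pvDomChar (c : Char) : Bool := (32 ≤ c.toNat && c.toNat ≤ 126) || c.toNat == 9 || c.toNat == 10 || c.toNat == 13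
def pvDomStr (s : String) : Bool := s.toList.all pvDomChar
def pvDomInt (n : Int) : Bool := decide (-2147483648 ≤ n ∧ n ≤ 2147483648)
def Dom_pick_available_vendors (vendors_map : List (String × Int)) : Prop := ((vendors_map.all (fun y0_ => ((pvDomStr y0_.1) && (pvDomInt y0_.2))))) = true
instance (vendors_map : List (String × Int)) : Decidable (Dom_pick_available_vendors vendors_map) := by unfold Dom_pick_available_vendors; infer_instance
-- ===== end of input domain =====

-- B replaces the preferred-list scan with a rank table and one counting-sort pass over the vendor map (alternative decomposition, same cost).


-- module constant NVIDIA_PARTNERS_PREFERRED (shared by both Pythons)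
def pvPreferred : List String :=
  ["MSI", "Asus", "Gigabyte Technology", "Gigabyte", "EVGA", "Zotac", "PNY",
   "Palit", "Gainward", "KFA2", "Colorful", "Inno3D", "GALAX", "Super Flower"]

-- ===== PORT A =====
-- vm_lower = {k.lower(): (k, vid) for k, vid in vendors_map.items()}  (last-wins dict comprehension)
def pvVmA (vendors_map : List (String × Int)) : PySem.Dict String (String × Int) :=
  vendors_map.foldl (fun d p => d.insert (PySem.Str.lower p.1) (p.1, p.2)) PySem.Dict.empty

-- dedup loop: for name, vid in chosen: if vid not in seen: unique.append((name, vid)); seen.add(vid)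
def pvDedupA (chosen : List (String × Int)) : List (String × Int) × PySem.Set Int :=
  chosen.foldl (fun st p => if PySem.Set.contains st.2 p.2 then st else (st.1 ++ [p], PySem.Set.add st.2 p.2))
    ([], PySem.Set.empty)

def pick_available_vendors (vendors_map : List (String × Int)) : List (String × Int) :=
  let vm := pvVmA vendors_map
  -- for name in NVIDIA_PARTNERS_PREFERRED: hit = vm_lower.get(name.lower()); if hit: chosen.append(hit)
  let chosen := pvPreferred.foldl (fun acc name =>
      match vm.get? (PySem.Str.lower name) with
      | some hit => acc ++ [hit]
      | none => acc) []
  -- if 'nvidia' in vm_lower: chosen.append(vm_lower['nvidia'])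
  let chosen := match vm.get? "nvidia" with
      | some hit => chosen ++ [hit]
      | none => chosen
  -- unique[:VENDORS_PER_MODEL]; take is exact for a nonnegative literal bound
  (pvDedupA chosen).1.take 6

-- ===== PORT B =====
def pvVmB (vendors_map : List (String × Int)) : PySem.Dict String (String × Int) :=
  vendors_map.foldl (fun d p => d.insert (PySem.Str.lower p.1) (p.1, p.2)) PySem.Dict.empty

-- rank = {name.lower(): i for i, name in enumerate(NVIDIA_PARTNERS_PREFERRED)}; rank['nvidia'] = len(...)
def pvRank : PySem.Dict String Int :=
  ((PySem.List.enumerate pvPreferred).foldl (fun d p => d.insert (PySem.Str.lower p.2) p.1)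
    PySem.Dict.empty).insert "nvidia" (pvPreferred.length : Int)

-- for k, hit in vm_lower.items(): r = rank.get(k); if r is not None: buckets[r] = hit
-- pySetD is exact here: every rank value lies in [0, len(buckets))
def pvFill (l : List (String × (String × Int))) (b : List (Option (String × Int))) :
    List (Option (String × Int)) :=
  l.foldl (fun b p =>
    match pvRank.get? p.1 with
    | some r => PySem.List.pySetD b r (some p.2)
    | none => b) b

-- for hit in buckets: if hit is not None and hit[1] not in seen: unique.append(hit); seen.add(hit[1])
def pvDedupB (buckets : List (Option (String × Int))) : List (String × Int) × PySem.Set Int :=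
  buckets.foldl (fun st o =>
    match o with
    | some hit => if PySem.Set.contains st.2 hit.2 then st else (st.1 ++ [hit], PySem.Set.add st.2 hit.2)
    | none => st) ([], PySem.Set.empty)

def pick_available_vendors_alt (vendors_map : List (String × Int)) : List (String × Int) :=
  let vm := pvVmB vendors_map
  let buckets := pvFill vm.items (List.replicate (pvPreferred.length + 1) none)
  (pvDedupB buckets).1.take 6

-- ===== PRECONDITION & SPEC =====
def Spec_pick_available_vendors (vendors_map : List (String × Int)) (out : List (String × Int)) : Prop := out = pick_available_vendors_alt vendors_map
instance (vendors_map : List (String × Int)) (out : List (String × Int)) : Decidable (Spec_pick_available_vendors vendors_map out) := by unfold Spec_pick_available_vendors; infer_instance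

-- ===== CLAIM (what is proved, stated in full; the proofs are below) =====
def Claim_equal_pick_available_vendors : Prop := ∀ (vendors_map : List (String × Int)), Dom_pick_available_vendors vendors_map → Spec_pick_available_vendors vendors_map (pick_available_vendors vendors_map)

-- ===== LEMMAS AND PROOFS =====

-- the lowercased priority names in rank order ('nvidia' last)
def pvLows : List String :=
  ["msi", "asus", "gigabyte technology", "gigabyte", "evga", "zotac", "pny",
   "palit", "gainward", "kfa2", "colorful", "inno3d", "galax", "super flower", "nvidia"]

lemma pvVm_eq (v : List (String × Int)) : pvVmB v = pvVmA v := rfl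

-- rank.get(k) is exactly the index of k in the lowered priority list
lemma pvRank_get_aux (names : List String) (off : Int) (k : String) :
    (PySem.Dict.mk ((PySem.List.enumerate names off).map (fun p => (p.2, p.1)))).get? k
      = (names.idxOf? k).map (fun n => off + (n : Int)) := by
  induction names generalizing off with
  | nil => rfl
  | cons x t ih =>
    rw [PySem.List.enumerate_cons]
    simp only [List.map_cons, PySem.Dict.get?_mk_cons, List.idxOf?, List.findIdx?_cons]
    by_cases h : (x == k)
    · simp [h]
    · rw [if_neg (by simpa using h), ih (off + 1)]
      simp only [List.idxOf?] at *
      cases List.findIdx? (fun a => a == k) t <;> simp [beq_iff_eq] at h ⊢ <;> simp [h] <;> omega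

lemma pvRank_get (k : String) :
    pvRank.get? k = (pvLows.idxOf? k).map (fun n => (n : Int)) := by
  have h : pvRank = PySem.Dict.mk ((PySem.List.enumerate pvLows 0).map (fun p => (p.2, p.1))) := by decide
  rw [h, pvRank_get_aux]
  simp

lemma pvIdxOf?_some {l : List String} {k : String} {n : Nat} (h : l.idxOf? k = some n) :
    l[n]? = some k ∧ n < l.length := by
  rw [← PySem.List.index?_eq_idxOf?, PySem.List.index?_eq_some_iff] at h
  obtain ⟨pre, suf, rfl, rfl, hnp⟩ := h
  refine ⟨?_, by simp⟩
  rw [List.getElem?_append_right (le_refl _)]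
  simp

-- dict lookup as first matching item
lemma pvGet?_find? (d : PySem.Dict String (String × Int)) (k : String) :
    d.get? k = (d.items.find? (fun p => p.1 == k)).map (·.2) := by
  obtain ⟨l⟩ := d
  induction l with
  | nil => rfl
  | cons p t ih =>
    rw [show (PySem.Dict.mk (p :: t)).items = p :: t from rfl, List.find?_cons]
    rw [PySem.Dict.get?_mk_cons]
    by_cases h : (p.1 == k) <;> simp [h] <;> simpa using ih

lemma pvFill_length (l : List (String × (String × Int))) (b : List (Option (String × Int))) :
    (pvFill l b).length = b.length := by
  induction l generalizing b with
  | nil => rfl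
  | cons p t ih =>
    simp only [pvFill, List.foldl_cons] at *
    cases pvRank.get? p.1 <;> simp [ih, PySem.List.length_pySetD]

-- the filling pass puts the FIRST (= only, keys are unique) entry keyed s into the slot of s
lemma pvFill_spec (l : List (String × (String × Int))) (hnd : (l.map Prod.fst).Nodup)
    (b : List (Option (String × Int))) (hb : b.length = 15)
    (j : Nat) (s : String) (hj : pvLows[j]? = some s) :
    (pvFill l b)[j]? =
      match l.find? (fun p => p.1 == s) with
      | some p => some (some p.2)
      | none => b[j]? := by
  induction l generalizing b with
  | nil => rfl
  | cons p t ih =>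
    obtain ⟨k, v⟩ := p
    simp only [List.map_cons, List.nodup_cons] at hnd
    simp only [pvFill, List.foldl_cons] at *
    have hmem : s ∈ pvLows := List.mem_of_getElem? hj
    have hjlt : j < 15 := by
      by_contra hge
      rw [List.getElem?_eq_none (by simp [pvLows]; omega)] at hj
      exact absurd hj (by simp)
    rw [List.find?_cons]
    cases hk : pvLows.idxOf? k with
    | none =>
      have hknot : k ∉ pvLows := by
        rwa [← PySem.List.index?_eq_idxOf?, PySem.List.index?_eq_none_iff] at hk
      have hne : (k == s) = false := by
        simp only [beq_eq_false_iff_ne]; rintro rfl; exact hknot hmem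
      have hr : pvRank.get? k = none := by rw [pvRank_get, hk]; rfl
      simp only [hr]
      rw [ih hnd.2 b hb, hne]
    | some n =>
      obtain ⟨hn, hnlt⟩ := pvIdxOf?_some hk
      have hr : pvRank.get? k = some ((n : Int)) := by rw [pvRank_get, hk]; rfl
      simp only [hr]
      have hset : PySem.List.pySetD b ((n : Int)) (some v) = b.set n (some v) :=
        PySem.List.pySetD_natCast b n (some v)
      rw [hset, ih hnd.2 _ (by simp [hb])]
      by_cases hjs : k = s
      · subst hjs
        have hjn : j = n := by
          have := List.getElem?_inj (xs := pvLows) (by simpa [pvLows] using hjlt)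
            (by decide) (hj.trans hn.symm)
          omega
        subst hjn
        have hfind : t.find? (fun p => p.1 == k) = none := by
          rw [List.find?_eq_none]
          intro p hp hpk
          have hm : p.1 ∈ List.map Prod.fst t := List.mem_map_of_mem (f := Prod.fst) hp
          rw [beq_iff_eq.mp hpk] at hm
          exact hnd.1 hm
        rw [hfind]
        simp [List.getElem?_set, hb, hjlt]
      · have hne : (k == s) = false := by simpa using hjs
        rw [hne]
        have hjn : j ≠ n := by
          rintro rfl
          exact hjs (by rw [hj] at hn; exact (Option.some_inj.mp hn).symm ▸ rfl)
        have hjn' : ¬ n = j := fun h => hjn h.symm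
        cases hfind : t.find? (fun p => p.1 == s) <;>
          simp [List.getElem?_set, hjn']

-- a fold appending each hit is a filterMap
lemma pvFoldl_match_append (g : String → Option (String × Int)) (l : List String)
    (acc : List (String × Int)) :
    l.foldl (fun acc name => match g name with | some hit => acc ++ [hit] | none => acc) acc
      = acc ++ l.filterMap g := by
  induction l generalizing acc with
  | nil => simp
  | cons x t ih =>
    rw [List.foldl_cons, List.filterMap_cons]
    cases h : g x <;> simp [h, ih]

-- the dedup loop over option slots is the dedup loop over the present hits
lemma pvDedup_filterMap (os : List (Option (String × Int)))
    (st : List (String × Int) × PySem.Set Int) :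
    os.foldl (fun st o =>
      match o with
      | some hit => if PySem.Set.contains st.2 hit.2 then st else (st.1 ++ [hit], PySem.Set.add st.2 hit.2)
      | none => st) st
    = (os.filterMap id).foldl (fun st p =>
        if PySem.Set.contains st.2 p.2 then st else (st.1 ++ [p], PySem.Set.add st.2 p.2)) st := by
  induction os generalizing st with
  | nil => rfl
  | cons o t ih => cases o with
    | none => simpa using ih st
    | some v => simpa using ih _

-- the filled bucket list IS the list of lookups of the priority names, in rank order
lemma pvBuckets_eq (vm : PySem.Dict String (String × Int)) (hnd : vm.keys.Nodup) :
    pvFill vm.items (List.replicate (pvPreferred.length + 1) none)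
      = pvLows.map (fun s => vm.get? s) := by
  apply List.ext_getElem?
  intro j
  by_cases hjlt : j < 15
  · have hj : pvLows[j]? = some (pvLows[j]'(by simpa [pvLows] using hjlt)) :=
      List.getElem?_eq_getElem _
    rw [pvFill_spec vm.items hnd _ (by simp [pvPreferred]) j _ hj]
    rw [List.getElem?_map, hj]
    simp only [Option.map_some]
    rw [pvGet?_find?]
    cases hfind : vm.items.find? (fun p => p.1 == pvLows[j]'(by simpa [pvLows] using hjlt)) with
    | none =>
      simp only [hfind, Option.map_none]
      rw [List.getElem?_replicate_of_lt (by simp [pvPreferred]; omega)]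
    | some p => simp [hfind]
  · rw [List.getElem?_eq_none, List.getElem?_eq_none]
    · simpa [pvLows] using hjlt
    · rw [pvFill_length]; simp [pvPreferred]; omega

-- ===== VERDICT (by name: the statement is the Claim_ definition above) =====
theorem pick_available_vendors_spec : Claim_equal_pick_available_vendors := by
  intro v _
  unfold Spec_pick_available_vendors
  have hnd : (pvVmA v).keys.Nodup :=
    PySem.Dict.nodup_keys_foldl_insert_key v (fun p => PySem.Str.lower p.1)
      (fun _ p => (p.1, p.2)) PySem.Dict.empty PySem.Dict.nodup_keys_empty
  have hbk := pvBuckets_eq (pvVmA v) hnd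
  have hch := pvFoldl_match_append (fun name => (pvVmA v).get? (PySem.Str.lower name)) pvPreferred []
  have hlows : pvLows = pvPreferred.map PySem.Str.lower ++ ["nvidia"] := by decide
  have hfm : pvLows.filterMap (fun s => (pvVmA v).get? s)
      = pvPreferred.filterMap (fun name => (pvVmA v).get? (PySem.Str.lower name)) ++
        (match (pvVmA v).get? "nvidia" with | some hit => [hit] | none => []) := by
    rw [hlows, List.filterMap_append, List.filterMap_map]
    cases h : (pvVmA v).get? "nvidia" <;> simp [List.filterMap, h]
  simp only [pick_available_vendors, pick_available_vendors_alt, pvVm_eq, hbk, hch,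
    pvDedupA, pvDedupB, pvDedup_filterMap, List.filterMap_map, List.nil_append]
  simp only [Function.id_comp, hfm]
  cases h : (pvVmA v).get? "nvidia" <;> simp [h]
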